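-- pv_equiv track=rewrite | github.com/ifecog/Data-Structures-LeetCode-HackerRank | U/questions2.py | collect_sticks
-- ===== SOURCE A (Python) =====
-- def collect_sticks(forest, bird):
--     n = len(forest)
--
--     pos = bird
--     direction = 1
--
--     nest_size = 0
--     picked_indices = []
--
--     while nest_size < 100:
--         if not (0 <= pos < n):
--             break
--
--         while 0 <= pos < n and forest[pos] == 0:
--             pos += direction
--
--         # Collect the sticks
--         nest_size += forest[pos]
--         picked_indices.append(pos)
--
--         # Mark that position as visited
--         forest[pos] = 0
--
--         direction *= -1
--
--     return picked_indices
-- ===== SOURCE B (Python) =====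
-- def collect_sticks(forest, bird):
--     # Two-pointer walk over precomputed nonzero-index lists (no mutation, no rescanning).
--     # Note: A zeroes picked entries of `forest` in place; B leaves `forest` untouched
--     # (the equivalence is about the return value only).
--     n = len(forest)
--     if not (0 <= bird < n):
--         return []
--     rights = [i for i in range(bird, n) if forest[i] != 0]
--     lefts = [i for i in range(bird - 1, -1, -1) if forest[i] != 0]
--     picked = []
--     total = 0
--     cur, other = rights, lefts
--     i, j = 0, 0
--     while total < 100:
--         if i >= len(cur):
--             break
--         idx = cur[i]
--         total += forest[idx]
--         picked.append(idx)
--         cur, other, i, j = other, cur, j, i + 1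
--     return picked
-- ===== Notes on version B (the rewrite author's own statement) =====
-- stated objective: alternative
-- what changed: A repeatedly rescans and mutates the array to find the next stick in each direction; B precomputes the nonzero indices on each side of the bird once and walks them with two alternating pointers, never touching the array again.
-- intended difference: On inputs where the bird starts in range and the left side runs out of sticks before the nest reaches 100, A appends the bogus index -1 (Python negative-index wraparound reads and zeroes the last element) to the picked list, while B returns just the genuinely picked indices, which is the intended result. — e.g. on collect_sticks([5], 0): A returns [0, -1], B returns [0]
import Mathlib
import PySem

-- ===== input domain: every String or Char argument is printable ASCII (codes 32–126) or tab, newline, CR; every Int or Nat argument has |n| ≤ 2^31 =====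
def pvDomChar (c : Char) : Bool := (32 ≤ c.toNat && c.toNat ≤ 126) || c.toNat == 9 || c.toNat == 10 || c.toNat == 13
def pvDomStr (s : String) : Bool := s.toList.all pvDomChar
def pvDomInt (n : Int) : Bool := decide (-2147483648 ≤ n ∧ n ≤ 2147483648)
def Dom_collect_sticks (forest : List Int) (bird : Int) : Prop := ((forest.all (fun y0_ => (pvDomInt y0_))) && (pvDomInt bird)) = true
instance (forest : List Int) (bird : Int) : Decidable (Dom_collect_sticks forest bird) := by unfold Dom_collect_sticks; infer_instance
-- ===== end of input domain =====

-- B replaces A's mutate-and-rescan simulation by a two-pointer walk over the nonzero-index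
-- lists on each side of the bird (alternative algorithm; return value only: A zeroes picked
-- entries of `forest` in place, B does not mutate).

-- ===== PORT A =====
-- inner while loop: 'while 0 <= pos < n and forest[pos] == 0: pos += direction'
-- (fuel only makes it total; g.length + 1 steps always suffice)
def pvSkip (g : List Int) (pos dir : Int) : Nat → Int
  | 0 => pos
  | f + 1 =>
    if 0 ≤ pos ∧ pos < (g.length : Int) ∧ PySem.List.pyGetD g pos 0 = 0
    then pvSkip g (pos + dir) dir f
    else pos

-- outer while loop; `none` from pyGet? is Python's IndexError (outside Pre_)
def pvALoop (g : List Int) (pos dir nest : Int) (picked : List Int) : Nat → List Int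
  | 0 => picked
  | f + 1 =>
    if nest < 100 then
      if 0 ≤ pos ∧ pos < (g.length : Int) then
        let p := pvSkip g pos dir (g.length + 1)
        match PySem.List.pyGet? g p with
        | none => picked
        | some v => pvALoop (PySem.List.pySetD g p 0) p (-dir) (nest + v) (picked ++ [p]) f
      else picked
    else picked

def collect_sticks (forest : List Int) (bird : Int) : List Int :=
  pvALoop forest bird 1 0 [] (forest.length + 2)

-- ===== PORT B =====
def pvVal (forest : List Int) (i : Int) : Int := PySem.List.pyGetD forest i 0

-- Source B's while loop: `cur` is the active index list, `other` the passive one; they swap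
-- after each pick (fuel only makes it total; |cur| + |other| + 1 always suffices)
def pvWalkF (forest cur other : List Int) (total : Int) : Nat → List Int
  | 0 => []
  | f + 1 =>
    if 100 ≤ total then []
    else
      match cur with
      | [] => []
      | a :: as => a :: pvWalkF forest other as (total + pvVal forest a) f

def collect_sticks_alt (forest : List Int) (bird : Int) : List Int :=
  if 0 ≤ bird ∧ bird < (forest.length : Int) then
    -- rights = [i for i in range(bird, n) if forest[i] != 0]
    let rights := (PySem.List.pyRange bird forest.length 1).filter (fun i => pvVal forest i != 0)
    -- lefts = [i for i in range(bird - 1, -1, -1) if forest[i] != 0]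
    let lefts := (PySem.List.pyRange (bird - 1) (-1) (-1)).filter (fun i => pvVal forest i != 0)
    pvWalkF forest rights lefts 0 (rights.length + lefts.length + 1)
  else []

-- ===== PRECONDITION & SPEC =====
-- Pre_ excludes exactly the inputs on which Python A raises IndexError: bird starts in range
-- and the right-hand sticks run out while every nest total seen so far is still below 100
-- (R / L are the nonzero stick values right / left of the bird, nearest first; the bird takes
-- one stick from R, then one from L, alternating, until the total reaches 100).
def Pre_collect_sticks (forest : List Int) (bird : Int) : Prop :=
  (0 ≤ bird ∧ bird < (forest.length : Int)) →
  ¬ (let R := List.filter (· != 0) (forest.drop bird.toNat)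
     let L := List.reverse (List.filter (· != 0) (forest.take bird.toNat))
     R.length ≤ L.length ∧
     ∀ j ≤ 2 * R.length, List.sum (R.take ((j + 1) / 2)) + List.sum (L.take (j / 2)) < 100)

instance (forest : List Int) (bird : Int) : Decidable (Pre_collect_sticks forest bird) := by
  unfold Pre_collect_sticks; infer_instance

def pvWitness_collect_sticks : List Int × Int := ([150], 0)

-- On inputs where the bird starts in range and the left-hand sticks run out before the nest
-- total reaches 100, A appends the bogus index -1 (Python negative-index wraparound: it reads
-- and zeroes the LAST element) to the result, while B returns exactly the indices of sticks
-- actually picked, which is the intended value.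
def D_collect_sticks (forest : List Int) (bird : Int) : Prop :=
  0 ≤ bird ∧ bird < forest.length ∧
  (let R := List.filter (· != 0) (forest.drop bird.toNat)
   let L := List.reverse (List.filter (· != 0) (forest.take bird.toNat))
   L.length < R.length ∧
   ∀ j ≤ 2 * L.length + 1, List.sum (R.take ((j + 1) / 2)) + List.sum (L.take (j / 2)) < 100)

instance (forest : List Int) (bird : Int) : Decidable (D_collect_sticks forest bird) := by
  unfold D_collect_sticks; infer_instance

def Spec_collect_sticks (forest : List Int) (bird : Int) (out : List Int) : Prop :=
  ¬ D_collect_sticks forest bird → out = collect_sticks_alt forest bird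

instance (forest : List Int) (bird : Int) (out : List Int) : Decidable (Spec_collect_sticks forest bird out) := by
  unfold Spec_collect_sticks; infer_instance

def pvDiffWitness_collect_sticks : List Int × Int := ([5], 0)
def pvDiffWitnessOut_collect_sticks : (List Int) × (List Int) := ([0, -1], [0])

-- ===== CLAIM (what is proved, stated in full; the proofs are below) =====
def Claim_unchanged_collect_sticks : Prop := ∀ (forest : List Int) (bird : Int), Dom_collect_sticks forest bird → Pre_collect_sticks forest bird → Spec_collect_sticks forest bird (collect_sticks forest bird)
def Claim_changed_collect_sticks : Prop := Dom_collect_sticks (pvDiffWitness_collect_sticks.1) (pvDiffWitness_collect_sticks.2) ∧ Pre_collect_sticks (pvDiffWitness_collect_sticks.1) (pvDiffWitness_collect_sticks.2) ∧ D_collect_sticks (pvDiffWitness_collect_sticks.1) (pvDiffWitness_collect_sticks.2) ∧ collect_sticks (pvDiffWitness_collect_sticks.1) (pvDiffWitness_collect_sticks.2) = pvDiffWitnessOut_collect_sticks.1 ∧ collect_sticks_alt (pvDiffWitness_collect_sticks.1) (pvDiffWitness_collect_sticks.2) = pvDiffWitnessOut_collect_sticks.2 ∧ pvDiffWitnessOut_collect_sticks.1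 ≠ pvDiffWitnessOut_collect_sticks.2
def Claim_exact_collect_sticks : Prop := ∀ (forest : List Int) (bird : Int), Dom_collect_sticks forest bird → Pre_collect_sticks forest bird → D_collect_sticks forest bird → collect_sticks forest bird ≠ collect_sticks_alt forest bird

-- ===== LEMMAS AND PROOFS =====

-- proof-side views: the pick order interleaves the two sides, right first
def pvInter : List Int → List Int → List Int
  | [], _ => []
  | a :: _, [] => [a]
  | a :: as, b :: bs => a :: b :: pvInter as bs

-- the index lists the picks walk through (B builds exactly these)
def pvR (forest : List Int) (bird : Int) : List Int :=
  (PySem.List.pyRange bird forest.length 1).filter (fun i => pvVal forest i != 0)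
def pvL (forest : List Int) (bird : Int) : List Int :=
  (PySem.List.pyRange (bird - 1) (-1) (-1)).filter (fun i => pvVal forest i != 0)

-- sum of the first j stick values in pick order, through the index lists
def pvPsum (forest A B : List Int) (j : Nat) : Int :=
  (((pvInter A B).take j).map (fun i => PySem.List.pyGetD forest i 0)).sum

-- sum of the first t stick values of one side, through its index list
def pvS (forest X : List Int) (t : Nat) : Int :=
  ((X.take t).map (fun i => PySem.List.pyGetD forest i 0)).sum

-- interleaving consumes the active list head, then swaps sides
lemma pvInter_cons : ∀ (n : Nat) (a : Int) (as B : List Int), as.length + B.length ≤ n →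
    pvInter (a :: as) B = a :: pvInter B as := by
  intro n
  induction n with
  | zero =>
    intro a as B h
    have has : as = [] := by cases as <;> simp_all
    have hb : B = [] := by cases B <;> simp_all
    subst has; subst hb; rfl
  | succ n ih =>
    intro a as B h
    cases B with
    | nil => cases as <;> rfl
    | cons b bs =>
      show a :: b :: pvInter as bs = a :: pvInter (b :: bs) as
      rw [ih b bs as (by simp at h; omega)]

lemma pvPsum_zero (forest A B : List Int) : pvPsum forest A B 0 = 0 := by
  simp [pvPsum]

lemma pvPsum_succ (forest : List Int) (a : Int) (as B : List Int) (j : Nat) :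
    pvPsum forest (a :: as) B (j + 1) = pvVal forest a + pvPsum forest B as j := by
  rw [pvPsum, pvInter_cons (as.length + B.length) a as B (by omega)]
  simp [pvPsum, pvVal]

-- which side (if any) runs out of sticks while the total is still below 100:
-- `some true` = the currently active list, `some false` = the passive one, `none` = the
-- total reaches 100 first
def pvStopF (forest cur other : List Int) (total : Int) : Nat → Option Bool
  | 0 => none
  | f + 1 =>
    if 100 ≤ total then none
    else
      match cur with
      | [] => some true
      | a :: as => (pvStopF forest other as (total + pvVal forest a) f).map (fun b => !b)

-- tail A appends beyond B's picks: [-1] exactly when the left side runs out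
def pvTail (dir : Int) (s : Option Bool) : List Int :=
  match s with
  | none => []
  | some true => if dir = -1 then [-1] else []
  | some false => if dir = 1 then [-1] else []

lemma pvTail_map_not (dir : Int) (s : Option Bool) (h : dir = 1 ∨ dir = -1) :
    pvTail dir (s.map (fun b => !b)) = pvTail (-dir) s := by
  rcases s with _ | b
  · simp [pvTail]
  · rcases b <;> rcases h with h | h <;> simp [pvTail, h]

-- characterisation of the stop side by prefix sums of the interleaved value sequence
lemma pvStopF_char : ∀ (n : Nat) (forest A B : List Int) (total : Int) (f : Nat),
    A.length + B.length ≤ n → A.length + B.length < f →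
    ((pvStopF forest A B total f = some true ↔
        (A.length ≤ B.length ∧ ∀ j ≤ 2 * A.length, total + pvPsum forest A B j < 100)) ∧
     (pvStopF forest A B total f = some false ↔
        (B.length < A.length ∧ ∀ j ≤ 2 * B.length + 1, total + pvPsum forest A B j < 100))) := by
  intro n
  induction n with
  | zero =>
    intro forest A B total f h hf
    have ha : A = [] := by cases A <;> simp_all
    have hb : B = [] := by cases B <;> simp_all
    subst ha; subst hb
    cases f with
    | zero => omega
    | succ f' =>
      show ((if _ then _ else _) = _ ↔ _) ∧ ((if _ then _ else _) = _ ↔ _)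
      by_cases ht : (100:Int) ≤ total
      · rw [if_pos ht]
        constructor
        · simp only [false_iff, reduceCtorEq]
          rintro ⟨-, hs⟩
          have := hs 0 (by omega)
          rw [pvPsum_zero] at this; omega
        · simp only [false_iff, reduceCtorEq]
          rintro ⟨-, hs⟩
          have := hs 0 (by omega)
          rw [pvPsum_zero] at this; omega
      · rw [if_neg ht]
        constructor
        · simp only [true_iff]
          refine ⟨le_rfl, fun j hj => ?_⟩
          have : j = 0 := by omega
          subst this; rw [pvPsum_zero]; omega
        · simp only [false_iff, Option.some.injEq, Bool.true_eq_false]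
          rintro ⟨hlen, -⟩
          simp at hlen
  | succ n ih =>
    intro forest A B total f h hf
    cases f with
    | zero => omega
    | succ f' =>
      show ((if _ then _ else _) = _ ↔ _) ∧ ((if _ then _ else _) = _ ↔ _)
      by_cases ht : (100:Int) ≤ total
      · rw [if_pos ht]
        constructor
        · simp only [false_iff, reduceCtorEq]
          rintro ⟨-, hs⟩
          have := hs 0 (by omega)
          rw [pvPsum_zero] at this; omega
        · simp only [false_iff, reduceCtorEq]
          rintro ⟨-, hs⟩
          have := hs 0 (by omega)
          rw [pvPsum_zero] at this; omega
      · rw [if_neg ht]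
        cases A with
        | nil =>
          constructor
          · simp only [true_iff]
            refine ⟨by simp, fun j hj => ?_⟩
            have : j = 0 := by simp at hj; omega
            subst this; rw [pvPsum_zero]; omega
          · simp only [false_iff, Option.some.injEq, Bool.true_eq_false]
            rintro ⟨hlen, -⟩
            simp at hlen
        | cons a as =>
          have hih := ih forest B as (total + pvVal forest a) f'
            (by simp at h ⊢; omega) (by simp at hf; omega)
          have hmt : ∀ s : Option Bool, (s.map (fun b => !b) = some true ↔ s = some false) := by
            intro s; cases s with
            | none => simp
            | some b => cases b <;> simp
          have hmf : ∀ s : Option Bool, (s.map (fun b => !b) = some false ↔ s = some true) := by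
            intro s; cases s with
            | none => simp
            | some b => cases b <;> simp
          constructor
          · show ((pvStopF forest B as _ f').map _ = _ ↔ _)
            rw [hmt, hih.2]
            constructor
            · rintro ⟨hlen, hs⟩
              refine ⟨by simp; omega, fun j hj => ?_⟩
              cases j with
              | zero => rw [pvPsum_zero]; omega
              | succ j' =>
                rw [pvPsum_succ]
                have := hs j' (by simp at hj; omega)
                omega
            · rintro ⟨hlen, hs⟩
              refine ⟨by simp at hlen; omega, fun j hj => ?_⟩
              have := hs (j + 1) (by simp; omega)
              rw [pvPsum_succ] at this
              omega
          · show ((pvStopF forest B as _ f').map _ = _ ↔ _)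
            rw [hmf, hih.1]
            constructor
            · rintro ⟨hlen, hs⟩
              refine ⟨by simp; omega, fun j hj => ?_⟩
              cases j with
              | zero => rw [pvPsum_zero]; omega
              | succ j' =>
                rw [pvPsum_succ]
                have := hs j' (by omega)
                omega
            · rintro ⟨hlen, hs⟩
              refine ⟨by simp at hlen; omega, fun j hj => ?_⟩
              have := hs (j + 1) (by simp at hlen ⊢; omega)
              rw [pvPsum_succ] at this
              omega

-- the inner scan, rightwards: lands on the first index ≥ pos whose entry is nonzero
lemma pvSkip_right : ∀ (fuel : Nat) (g : List Int) (pos q : Int),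
    0 ≤ pos → pos ≤ q → q ≤ (g.length : Int) →
    (∀ i : Int, pos ≤ i → i < q → PySem.List.pyGetD g i 0 = 0) →
    (q < (g.length : Int) → PySem.List.pyGetD g q 0 ≠ 0) →
    (q - pos).toNat < fuel →
    pvSkip g pos 1 fuel = q := by
  intro fuel
  induction fuel with
  | zero => intro g pos q _ _ _ _ _ hf; omega
  | succ f ih =>
    intro g pos q h0 hpq hql hzero hstop hf
    by_cases hq : pos = q
    · subst hq
      show (if _ then _ else _) = pos
      rw [if_neg]
      rintro ⟨-, hlt, hz⟩
      exact hstop hlt hz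
    · show (if _ then _ else _) = q
      rw [if_pos ⟨h0, by omega, hzero pos le_rfl (by omega)⟩]
      exact ih g (pos + 1) q (by omega) (by omega) hql
        (fun i hi1 hi2 => hzero i (by omega) hi2) hstop (by omega)

-- the inner scan, leftwards: lands on the first index ≤ pos whose entry is nonzero (or -1)
lemma pvSkip_left : ∀ (fuel : Nat) (g : List Int) (pos q : Int),
    -1 ≤ q → q ≤ pos → pos < (g.length : Int) →
    (∀ i : Int, q < i → i ≤ pos → PySem.List.pyGetD g i 0 = 0) →
    (0 ≤ q → PySem.List.pyGetD g q 0 ≠ 0) →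
    (pos - q).toNat < fuel →
    pvSkip g pos (-1) fuel = q := by
  intro fuel
  induction fuel with
  | zero => intro g pos q _ _ _ _ _ hf; omega
  | succ f ih =>
    intro g pos q hq0 hqp hpl hzero hstop hf
    by_cases hq : pos = q
    · subst hq
      show (if _ then _ else _) = pos
      rw [if_neg]
      rintro ⟨hge, -, hz⟩
      exact hstop hge hz
    · show (if _ then _ else _) = q
      rw [if_pos ⟨by omega, by omega, hzero pos (by omega) le_rfl⟩]
      exact ih g (pos - 1) q hq0 (by omega) (by omega)
        (fun i hi1 hi2 => hzero i hi1 (by omega)) hstop (by omega)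

lemma pyGetD_pySetD_int (g : List Int) (a i : Int) (h0 : 0 ≤ a)
    (hi0 : 0 ≤ i) (hi1 : i < (g.length : Int)) :
    PySem.List.pyGetD (PySem.List.pySetD g a 0) i 0 = if i = a then 0 else PySem.List.pyGetD g i 0 := by
  rw [PySem.List.pySetD_of_nonneg g 0 h0]
  rw [PySem.List.pyGetD_eq_getElem _ _ hi0 (by simpa using hi1)]
  rw [List.getElem_set]
  rw [PySem.List.pyGetD_eq_getElem _ _ hi0 hi1]
  by_cases h : i = a
  · simp [h]
  · rw [if_neg (by omega), if_neg h]

-- loop invariant, heading right: A = nonzero indices in [pos, n) ascending (next picks),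
-- B = nonzero indices in [0, pos) descending, untouched entries keep their original value
structure pvInvR (forest g : List Int) (pos : Int) (A B : List Int) : Prop where
  len : g.length = forest.length
  pos0 : 0 ≤ pos
  posn : pos < (g.length : Int)
  sa : A.Pairwise (· < ·)
  sb : B.Pairwise (· > ·)
  charA : ∀ i : Int, pos ≤ i → i < (g.length : Int) → (PySem.List.pyGetD g i 0 ≠ 0 ↔ i ∈ A)
  charB : ∀ i : Int, 0 ≤ i → i < pos → (PySem.List.pyGetD g i 0 ≠ 0 ↔ i ∈ B)
  bndA : ∀ i ∈ A, pos ≤ i ∧ i < (g.length : Int)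
  bndB : ∀ i ∈ B, 0 ≤ i ∧ i < pos
  valA : ∀ i ∈ A, PySem.List.pyGetD g i 0 = PySem.List.pyGetD forest i 0
  valB : ∀ i ∈ B, PySem.List.pyGetD g i 0 = PySem.List.pyGetD forest i 0

-- loop invariant, heading left (mirror image)
structure pvInvL (forest g : List Int) (pos : Int) (A B : List Int) : Prop where
  len : g.length = forest.length
  pos0 : 0 ≤ pos
  posn : pos < (g.length : Int)
  sa : A.Pairwise (· > ·)
  sb : B.Pairwise (· < ·)
  charA : ∀ i : Int, 0 ≤ i → i ≤ pos → (PySem.List.pyGetD g i 0 ≠ 0 ↔ i ∈ A)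
  charB : ∀ i : Int, pos < i → i < (g.length : Int) → (PySem.List.pyGetD g i 0 ≠ 0 ↔ i ∈ B)
  bndA : ∀ i ∈ A, 0 ≤ i ∧ i < pos
  bndB : ∀ i ∈ B, pos < i ∧ i < (g.length : Int)
  valA : ∀ i ∈ A, PySem.List.pyGetD g i 0 = PySem.List.pyGetD forest i 0
  valB : ∀ i ∈ B, PySem.List.pyGetD g i 0 = PySem.List.pyGetD forest i 0

-- the simulation lemma: A's loop produces B's walk plus the bogus [-1] tail when the
-- left side runs out
lemma pvALoop_eq (forest : List Int) :
    ∀ (m : Nat) (A B g : List Int) (pos dir total : Int) (picked : List Int) (fuel wf : Nat),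
    A.length + B.length ≤ m →
    ((dir = 1 ∧ pvInvR forest g pos A B) ∨ (dir = -1 ∧ pvInvL forest g pos A B)) →
    A.length + B.length + 2 ≤ fuel →
    A.length + B.length < wf →
    pvALoop g pos dir total picked fuel =
      picked ++ pvWalkF forest A B total wf ++ pvTail dir (pvStopF forest A B total wf) := by
  intro m
  induction m using Nat.strong_induction_on with
  | _ m ih =>
  intro A B g pos dir total picked fuel wf hm hinv hfuel hwf
  cases fuel with
  | zero => omega
  | succ f =>
  cases wf with
  | zero => omega
  | succ wf' =>
  by_cases ht : total < 100
  case neg =>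
    simp only [pvALoop, pvWalkF, pvStopF]
    rw [if_neg ht, if_pos (by omega : (100:Int) ≤ total), if_pos (by omega : (100:Int) ≤ total)]
    simp [pvTail]
  case pos =>
  have ht' : ¬ (100:Int) ≤ total := by omega
  rcases hinv with ⟨hdir, inv⟩ | ⟨hdir, inv⟩
  · -- heading right
    subst hdir
    have hlen1 : (1:Int) ≤ g.length := by have := inv.posn; have := inv.pos0; omega
    simp only [pvALoop, pvWalkF, pvStopF]
    rw [if_pos ht, if_pos ⟨inv.pos0, inv.posn⟩, if_neg ht', if_neg ht']
    cases A with
    | nil =>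
      have hskip : pvSkip g pos 1 (g.length + 1) = (g.length : Int) := by
        apply pvSkip_right _ _ _ _ inv.pos0 (le_of_lt inv.posn) le_rfl
        · intro i hi1 hi2
          by_contra hne
          exact (List.not_mem_nil (a := i)).elim ((inv.charA i hi1 hi2).mp hne)
        · intro hlt; omega
        · have := inv.pos0; have := inv.posn; omega
      rw [hskip]
      have hget : PySem.List.pyGet? g (g.length : Int) = none := by
        rw [PySem.List.pyGet?_eq_none_iff]
        intro hr
        rcases hr with ⟨-, hlt⟩
        omega
      rw [hget]
      show picked = (picked ++ []) ++ pvTail 1 (some true)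
      simp [pvTail]
    | cons a as =>
      have hbnd := inv.bndA a (by simp)
      have has : ∀ i ∈ as, a < i := (List.pairwise_cons.mp inv.sa).1
      have hzero : ∀ i : Int, pos ≤ i → i < a → PySem.List.pyGetD g i 0 = 0 := by
        intro i hi1 hi2
        by_contra hne
        have := (inv.charA i hi1 (by omega)).mp hne
        simp at this
        rcases this with h | h
        · omega
        · exact absurd (has i h) (by omega)
      have hskip : pvSkip g pos 1 (g.length + 1) = a := by
        apply pvSkip_right _ _ _ _ inv.pos0 hbnd.1 (le_of_lt hbnd.2) hzero
        · intro _
          exact (inv.charA a hbnd.1 hbnd.2).mpr (by simp)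
        · have := inv.pos0; have := inv.posn; omega
      rw [hskip]
      have ha0 : (0:Int) ≤ a := le_trans inv.pos0 hbnd.1
      have hval : PySem.List.pyGetD g a 0 = pvVal forest a := inv.valA a (by simp)
      have hget : PySem.List.pyGet? g a = some (pvVal forest a) := by
        rw [PySem.List.pyGet?_eq_some_getElem _ ha0 hbnd.2]
        rw [← PySem.List.pyGetD_eq_getElem g (0:Int) ha0 hbnd.2, hval]
      rw [hget]
      have hset : ∀ i : Int, 0 ≤ i → i < (g.length : Int) →
          PySem.List.pyGetD (PySem.List.pySetD g a 0) i 0 =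
            if i = a then 0 else PySem.List.pyGetD g i 0 :=
        fun i hi0 hi1 => pyGetD_pySetD_int g a i ha0 hi0 hi1
      have hglen : (PySem.List.pySetD g a 0).length = g.length := PySem.List.length_pySetD g a 0
      have hinvL : pvInvL forest (PySem.List.pySetD g a 0) a B as := by
        refine ⟨by rw [hglen]; exact inv.len, ha0, by rw [hglen]; exact_mod_cast hbnd.2,
          inv.sb, (List.pairwise_cons.mp inv.sa).2, ?_, ?_, ?_, ?_, ?_, ?_⟩
        · intro i hi0 hia
          rw [hglen] at *
          rw [hset i hi0 (by omega)]
          by_cases hieq : i = a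
          · subst hieq
            constructor
            · intro h; exact absurd (if_pos rfl) h
            · intro hmem; exact absurd (inv.bndB i hmem).2 (by omega)
          · rw [if_neg hieq]
            by_cases hip : i < pos
            · exact inv.charB i hi0 hip
            · constructor
              · intro hne
                exact absurd (hzero i (by omega) (by omega)) hne
              · intro hmem
                exact absurd (inv.bndB i hmem).2 (by omega)
        · intro i hia hil
          rw [hglen] at *
          rw [hset i (by omega) hil]
          rw [if_neg (by omega)]
          have := inv.charA i (by omega) hil
          rw [this]
          constructor
          · intro hmem
            simp at hmem
            rcases hmem with h | h
            · omega
            · exact h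
          · intro hmem; simp [hmem]
        · intro i hi
          have := inv.bndB i hi
          exact ⟨this.1, by omega⟩
        · intro i hi
          rw [hglen]
          exact ⟨has i hi, (inv.bndA i (by simp [hi])).2⟩
        · intro i hi
          have hb := inv.bndB i hi
          rw [hset i hb.1 (by have := inv.posn; omega), if_neg (by omega)]
          exact inv.valB i hi
        · intro i hi
          have hb := inv.bndA i (by simp [hi])
          rw [hset i (by have := has i hi; omega) hb.2, if_neg (by have := has i hi; omega)]
          exact inv.valA i (by simp [hi])
      have hrec := ih (B.length + as.length) (by simp at hm; omega) B as
        (PySem.List.pySetD g a 0) a (-1) (total + pvVal forest a) (picked ++ [a]) f wf'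
        le_rfl (Or.inr ⟨rfl, hinvL⟩) (by simp at hfuel; omega) (by simp at hwf; omega)
      show pvALoop (PySem.List.pySetD g a 0) a (-1) (total + pvVal forest a) (picked ++ [a]) f =
        (picked ++ (a :: pvWalkF forest B as (total + pvVal forest a) wf')) ++
          pvTail 1 ((pvStopF forest B as (total + pvVal forest a) wf').map (fun b => !b))
      rw [hrec, pvTail_map_not 1 _ (Or.inl rfl)]
      simp
  · -- heading left
    subst hdir
    have hlen1 : (1:Int) ≤ g.length := by have := inv.posn; have := inv.pos0; omega
    simp only [pvALoop, pvWalkF, pvStopF]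
    rw [if_pos ht, if_pos ⟨inv.pos0, inv.posn⟩, if_neg ht', if_neg ht']
    cases A with
    | nil =>
      have hskip : pvSkip g pos (-1) (g.length + 1) = -1 := by
        apply pvSkip_left _ _ _ _ le_rfl (by have := inv.pos0; omega) inv.posn
        · intro i hi1 hi2
          by_contra hne
          exact (List.not_mem_nil (a := i)).elim ((inv.charA i (by omega) hi2).mp hne)
        · intro h0; omega
        · have := inv.posn; omega
      rw [hskip]
      have hne : g ≠ [] := by
        intro h; subst h; simp at hlen1
      have hget : ∃ v, PySem.List.pyGet? g (-1) = some v := by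
        rw [PySem.List.pyGet?_neg_one]
        exact ⟨g.getLast hne, List.getLast?_eq_some_getLast hne⟩
      rcases hget with ⟨v, hget⟩
      rw [hget]
      have hf1 : 1 ≤ f := by simp at hfuel; omega
      cases f with
      | zero => omega
      | succ f'' =>
        have hstep : pvALoop (PySem.List.pySetD g (-1) 0) (-1) (-(-1)) (total + v) (picked ++ [-1]) (f'' + 1) = picked ++ [-1] := by
          simp only [pvALoop]
          by_cases h2 : total + v < 100
          · rw [if_pos h2, if_neg (by rintro ⟨hc, -⟩; omega)]
          · rw [if_neg h2]
        show pvALoop (PySem.List.pySetD g (-1) 0) (-1) (-(-1)) (total + v) (picked ++ [-1]) (f'' + 1) =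
          (picked ++ []) ++ pvTail (-1) (some true)
        rw [hstep]
        simp [pvTail]
    | cons a as =>
      have hbnd := inv.bndA a (by simp)
      have has : ∀ i ∈ as, a > i := (List.pairwise_cons.mp inv.sa).1
      have hzero : ∀ i : Int, a < i → i ≤ pos → PySem.List.pyGetD g i 0 = 0 := by
        intro i hi1 hi2
        by_contra hne
        have := (inv.charA i (by omega) hi2).mp hne
        simp at this
        rcases this with h | h
        · omega
        · exact absurd (has i h) (by omega)
      have hskip : pvSkip g pos (-1) (g.length + 1) = a := by
        apply pvSkip_left _ _ _ _ (by omega) (by omega) inv.posn hzero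
        · intro _
          exact (inv.charA a hbnd.1 (by omega)).mpr (by simp)
        · have := inv.posn; omega
      rw [hskip]
      have ha0 : (0:Int) ≤ a := hbnd.1
      have hailen : a < (g.length : Int) := by have := inv.posn; omega
      have hval : PySem.List.pyGetD g a 0 = pvVal forest a := inv.valA a (by simp)
      have hget : PySem.List.pyGet? g a = some (pvVal forest a) := by
        rw [PySem.List.pyGet?_eq_some_getElem _ ha0 hailen]
        rw [← PySem.List.pyGetD_eq_getElem g (0:Int) ha0 hailen, hval]
      rw [hget]
      have hset : ∀ i : Int, 0 ≤ i → i < (g.length : Int) →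
          PySem.List.pyGetD (PySem.List.pySetD g a 0) i 0 =
            if i = a then 0 else PySem.List.pyGetD g i 0 :=
        fun i hi0 hi1 => pyGetD_pySetD_int g a i ha0 hi0 hi1
      have hglen : (PySem.List.pySetD g a 0).length = g.length := PySem.List.length_pySetD g a 0
      have hinvR : pvInvR forest (PySem.List.pySetD g a 0) a B as := by
        refine ⟨by rw [hglen]; exact inv.len, ha0, by rw [hglen]; exact hailen,
          inv.sb, (List.pairwise_cons.mp inv.sa).2, ?_, ?_, ?_, ?_, ?_, ?_⟩
        · intro i hia hil
          rw [hglen] at *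
          rw [hset i (by omega) hil]
          by_cases hieq : i = a
          · subst hieq
            constructor
            · intro h; exact absurd (if_pos rfl) h
            · intro hmem; exact absurd (inv.bndB i hmem).1 (by omega)
          · rw [if_neg hieq]
            by_cases hip : pos < i
            · exact inv.charB i hip hil
            · constructor
              · intro hne
                exact absurd (hzero i (by omega) (by omega)) hne
              · intro hmem
                exact absurd (inv.bndB i hmem).1 (by omega)
        · intro i hi0 hia
          rw [hglen] at *
          rw [hset i hi0 (by omega)]
          rw [if_neg (by omega)]
          have := inv.charA i hi0 (by omega)
          rw [this]
          constructor
          · intro hmem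
            simp at hmem
            rcases hmem with h | h
            · omega
            · exact h
          · intro hmem; simp [hmem]
        · intro i hi
          have := inv.bndB i hi
          rw [hglen]
          exact ⟨by omega, this.2⟩
        · intro i hi
          have := inv.bndA i (by simp [hi])
          exact ⟨this.1, has i hi⟩
        · intro i hi
          have hb := inv.bndB i hi
          rw [hset i (by omega) hb.2, if_neg (by omega)]
          exact inv.valB i hi
        · intro i hi
          have hb := inv.bndA i (by simp [hi])
          rw [hset i hb.1 (by have := inv.posn; omega), if_neg (by have := has i hi; omega)]
          exact inv.valA i (by simp [hi])
      have hrec := ih (B.length + as.length) (by simp at hm; omega) B as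
        (PySem.List.pySetD g a 0) a 1 (total + pvVal forest a) (picked ++ [a]) f wf'
        le_rfl (Or.inl ⟨rfl, hinvR⟩) (by simp at hfuel; omega) (by simp at hwf; omega)
      show pvALoop (PySem.List.pySetD g a 0) a (-(-1)) (total + pvVal forest a) (picked ++ [a]) f =
        (picked ++ (a :: pvWalkF forest B as (total + pvVal forest a) wf')) ++
          pvTail (-1) ((pvStopF forest B as (total + pvVal forest a) wf').map (fun b => !b))
      rw [show (-(-1) : Int) = 1 from by norm_num, hrec, pvTail_map_not (-1) _ (Or.inr rfl),
        show (-(-1) : Int) = 1 from by norm_num]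
      simp

-- the initial state satisfies the rightward invariant
lemma pvInv_init (forest : List Int) (bird : Int) (h0 : 0 ≤ bird) (h1 : bird < (forest.length : Int)) :
    pvInvR forest forest bird (pvR forest bird) (pvL forest bird) := by
  have hmemR : ∀ i : Int, i ∈ pvR forest bird ↔
        (bird ≤ i ∧ i < (forest.length : Int)) ∧ PySem.List.pyGetD forest i 0 ≠ 0 := by
    intro i
    rw [pvR, List.mem_filter]
    simp only [PySem.List.mem_pyRange_one, pvVal, bne_iff_ne, ne_eq]
  have hmemL : ∀ i : Int, i ∈ pvL forest bird ↔
        (0 ≤ i ∧ i < bird) ∧ PySem.List.pyGetD forest i 0 ≠ 0 := by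
    intro i
    rw [pvL, List.mem_filter]
    simp only [PySem.List.mem_pyRange_neg_one, pvVal, bne_iff_ne, ne_eq]
    constructor
    · rintro ⟨⟨ha, hb⟩, hc⟩; exact ⟨⟨by omega, by omega⟩, hc⟩
    · rintro ⟨⟨ha, hb⟩, hc⟩; exact ⟨⟨by omega, by omega⟩, hc⟩
  refine ⟨rfl, h0, h1, ?_, ?_, ?_, ?_, ?_, ?_, ?_, ?_⟩
  · rw [pvR]
    exact (PySem.List.pairwise_lt_pyRange_one bird forest.length).filter _
  · have : (PySem.List.pyRange (bird - 1) (-1) (-1)).Pairwise (· > ·) := by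
      rw [PySem.List.pyRange_neg_one_eq_reverse]
      rw [List.pairwise_reverse]
      exact PySem.List.pairwise_lt_pyRange_one _ _
    rw [pvL]
    exact this.filter _
  · intro i hi1 hi2
    rw [hmemR i]
    constructor
    · intro hne; exact ⟨⟨hi1, hi2⟩, hne⟩
    · rintro ⟨-, hne⟩; exact hne
  · intro i hi1 hi2
    rw [hmemL i]
    constructor
    · intro hne; exact ⟨⟨hi1, hi2⟩, hne⟩
    · rintro ⟨-, hne⟩; exact hne
  · intro i hi; exact ((hmemR i).mp hi).1
  · intro i hi; exact ((hmemL i).mp hi).1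
  · intro i _; rfl
  · intro i _; rfl

lemma pvRL_length (forest : List Int) (bird : Int) (h0 : 0 ≤ bird) (h1 : bird < (forest.length : Int)) :
    (pvR forest bird).length + (pvL forest bird).length ≤ forest.length := by
  have hr : (pvR forest bird).length ≤ (PySem.List.pyRange bird forest.length 1).length :=
    List.length_filter_le _ _
  have hl : (pvL forest bird).length ≤ (PySem.List.pyRange (bird - 1) (-1) (-1)).length :=
    List.length_filter_le _ _
  rw [PySem.List.length_pyRange_one] at hr
  rw [PySem.List.length_pyRange_neg_one] at hl
  omega

-- prefix sums in pick order split into one-side prefix sums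
lemma pvPsum_take (forest : List Int) : ∀ t : Nat,
    (∀ A B : List Int, t ≤ A.length → t ≤ B.length + 1 →
      pvPsum forest A B (2 * t) = pvS forest A t + pvS forest B t) ∧
    (∀ A B : List Int, t ≤ A.length → t ≤ B.length →
      pvPsum forest A B (2 * t + 1) = pvS forest A (t + 1) + pvS forest B t) := by
  intro t
  induction t with
  | zero =>
    constructor
    · intro A B _ _; simp [pvPsum, pvS]
    · intro A B _ _
      cases A with
      | nil => simp [pvPsum, pvS, pvInter]
      | cons a as =>
        rw [show 2 * 0 + 1 = 0 + 1 from rfl, pvPsum_succ, pvPsum_zero]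
        simp [pvS, pvVal]
  | succ u ih =>
    have heven : ∀ A B : List Int, u + 1 ≤ A.length → u + 1 ≤ B.length + 1 →
        pvPsum forest A B (2 * (u + 1)) = pvS forest A (u + 1) + pvS forest B (u + 1) := by
      intro A B hA hB
      cases A with
      | nil => simp at hA
      | cons a as =>
        rw [show 2 * (u + 1) = (2 * u + 1) + 1 from by ring, pvPsum_succ]
        rw [(ih.2 B as (by omega) (by simp at hA; omega))]
        simp [pvS, pvVal, List.take_succ_cons]
        ring
    refine ⟨heven, ?_⟩
    intro A B hA hB
    cases A with
    | nil => simp at hA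
    | cons a as =>
      rw [show 2 * (u + 1) + 1 = (2 * (u + 1)) + 1 from rfl, pvPsum_succ]
      rw [heven B as (by omega) (by simp at hA; omega)]
      simp [pvS, pvVal, List.take_succ_cons]
      ring

-- the value lists the claim talks about are the index lists mapped through the forest
lemma pvVals_R (forest : List Int) (bird : Int) (h0 : 0 ≤ bird) :
    (forest.drop bird.toNat).filter (fun v => v != 0) =
      (pvR forest bird).map (fun i => PySem.List.pyGetD forest i 0) := by
  rw [pvR, ← PySem.List.map_pyGetD_pyRange forest 0 h0, List.filter_map]
  simp only [Function.comp_def, pvVal, PySem.List.len]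

lemma pvVals_L (forest : List Int) (bird : Int) (h0 : 0 ≤ bird) (h1 : bird ≤ (forest.length : Int)) :
    ((forest.take bird.toNat).filter (fun v => v != 0)).reverse =
      (pvL forest bird).map (fun i => PySem.List.pyGetD forest i 0) := by
  have htake : (PySem.List.pyRange 0 bird 1).map (fun j => PySem.List.pyGetD forest j 0) =
      forest.take bird.toNat := by
    have hsplit := PySem.List.pyRange_one_append 0 bird (forest.length : Int) h0 h1
    have happ : (PySem.List.pyRange 0 bird 1).map (fun j => PySem.List.pyGetD forest j 0) ++
        (PySem.List.pyRange bird (forest.length : Int) 1).map (fun j => PySem.List.pyGetD forest j 0) =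
        forest := by
      rw [← List.map_append, ← hsplit]
      exact PySem.List.map_pyGetD_pyRange_zero forest 0

    rw [show PySem.List.pyRange bird (forest.length : Int) 1 =
          PySem.List.pyRange bird (PySem.List.len forest) 1 from rfl,
        PySem.List.map_pyGetD_pyRange forest 0 h0] at happ
    apply List.append_inj_left (happ.trans (List.take_append_drop bird.toNat forest).symm)
    rw [List.length_map, PySem.List.length_pyRange_one, List.length_take]
    omega
  have hrev : PySem.List.pyRange (bird - 1) (-1) (-1) = (PySem.List.pyRange 0 bird 1).reverse := by
    have := PySem.List.pyRange_neg_one_eq_reverse (bird - 1) (-1)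
    simpa using this
  rw [pvL, hrev, List.filter_reverse, List.map_reverse]
  congr 1
  rw [← htake, List.filter_map]
  simp only [Function.comp_def, pvVal]

-- the claim-side conditions, restated through the index lists
lemma pvPreArg_iff (forest : List Int) (bird : Int) (h0 : 0 ≤ bird) (h1 : bird < (forest.length : Int)) :
    (let R := List.filter (· != 0) (forest.drop bird.toNat)
     let L := List.reverse (List.filter (· != 0) (forest.take bird.toNat))
     R.length ≤ L.length ∧
     ∀ j ≤ 2 * R.length, List.sum (R.take ((j + 1) / 2)) + List.sum (L.take (j / 2)) < 100) ↔
    ((pvR forest bird).length ≤ (pvL forest bird).length ∧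
     ∀ j ≤ 2 * (pvR forest bird).length, pvPsum forest (pvR forest bird) (pvL forest bird) j < 100) := by
  simp only [pvVals_R forest bird h0, pvVals_L forest bird h0 (le_of_lt h1),
    List.length_map, ← List.map_take, ← pvS.eq_def]
  have key : (pvR forest bird).length ≤ (pvL forest bird).length →
      ∀ j, j ≤ 2 * (pvR forest bird).length →
      pvPsum forest (pvR forest bird) (pvL forest bird) j =
        pvS forest (pvR forest bird) ((j + 1) / 2) + pvS forest (pvL forest bird) (j / 2) := by
    intro hlen j hj
    rcases Nat.even_or_odd j with ⟨t, ht⟩ | ⟨t, ht⟩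
    · rw [show j = 2 * t from by omega, show (2 * t + 1) / 2 = t from by omega,
        show 2 * t / 2 = t from by omega]
      exact (pvPsum_take forest t).1 _ _ (by omega) (by omega)
    · rw [show j = 2 * t + 1 from by omega, show (2 * t + 1 + 1) / 2 = t + 1 from by omega,
        show (2 * t + 1) / 2 = t from by omega]
      exact (pvPsum_take forest t).2 _ _ (by omega) (by omega)
  constructor
  · rintro ⟨hlen, h⟩
    exact ⟨hlen, fun j hj => by rw [key hlen j hj]; exact h j hj⟩
  · rintro ⟨hlen, h⟩
    exact ⟨hlen, fun j hj => by rw [← key hlen j hj]; exact h j hj⟩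

lemma pvDArg_iff (forest : List Int) (bird : Int) (h0 : 0 ≤ bird) (h1 : bird < (forest.length : Int)) :
    (let R := List.filter (· != 0) (forest.drop bird.toNat)
     let L := List.reverse (List.filter (· != 0) (forest.take bird.toNat))
     L.length < R.length ∧
     ∀ j ≤ 2 * L.length + 1, List.sum (R.take ((j + 1) / 2)) + List.sum (L.take (j / 2)) < 100) ↔
    ((pvL forest bird).length < (pvR forest bird).length ∧
     ∀ j ≤ 2 * (pvL forest bird).length + 1, pvPsum forest (pvR forest bird) (pvL forest bird) j < 100) := by
  simp only [pvVals_R forest bird h0, pvVals_L forest bird h0 (le_of_lt h1),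
    List.length_map, ← List.map_take, ← pvS.eq_def]
  have key : (pvL forest bird).length < (pvR forest bird).length →
      ∀ j, j ≤ 2 * (pvL forest bird).length + 1 →
      pvPsum forest (pvR forest bird) (pvL forest bird) j =
        pvS forest (pvR forest bird) ((j + 1) / 2) + pvS forest (pvL forest bird) (j / 2) := by
    intro hlen j hj
    rcases Nat.even_or_odd j with ⟨t, ht⟩ | ⟨t, ht⟩
    · rw [show j = 2 * t from by omega, show (2 * t + 1) / 2 = t from by omega,
        show 2 * t / 2 = t from by omega]
      exact (pvPsum_take forest t).1 _ _ (by omega) (by omega)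
    · rw [show j = 2 * t + 1 from by omega, show (2 * t + 1 + 1) / 2 = t + 1 from by omega,
        show (2 * t + 1) / 2 = t from by omega]
      exact (pvPsum_take forest t).2 _ _ (by omega) (by omega)
  constructor
  · rintro ⟨hlen, h⟩
    exact ⟨hlen, fun j hj => by rw [key hlen j hj]; exact h j hj⟩
  · rintro ⟨hlen, h⟩
    exact ⟨hlen, fun j hj => by rw [← key hlen j hj]; exact h j hj⟩

-- full characterisation of A's result on in-range inputs
lemma collect_sticks_eq (forest : List Int) (bird : Int) (h0 : 0 ≤ bird) (h1 : bird < (forest.length : Int)) :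
    collect_sticks forest bird =
      collect_sticks_alt forest bird ++
        pvTail 1 (pvStopF forest (pvR forest bird) (pvL forest bird) 0
          ((pvR forest bird).length + (pvL forest bird).length + 1)) := by
  have h := pvALoop_eq forest ((pvR forest bird).length + (pvL forest bird).length)
    (pvR forest bird) (pvL forest bird) forest bird 1 0 []
    (forest.length + 2) ((pvR forest bird).length + (pvL forest bird).length + 1)
    le_rfl (Or.inl ⟨rfl, pvInv_init forest bird h0 h1⟩)
    (by have := pvRL_length forest bird h0 h1; omega) (by omega)
  rw [collect_sticks, h]
  simp only [collect_sticks_alt, if_pos (show 0 ≤ bird ∧ bird < (forest.length : Int) from ⟨h0, h1⟩),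
    pvR, pvL]
  simp

-- ===== VERDICT (by name: the statement is the Claim_ definition above) =====
theorem collect_sticks_spec : Claim_unchanged_collect_sticks := by
  intro forest bird hdom hpre hnd
  by_cases hrange : 0 ≤ bird ∧ bird < (forest.length : Int)
  · rw [collect_sticks_eq forest bird hrange.1 hrange.2]
    have hchar := pvStopF_char ((pvR forest bird).length + (pvL forest bird).length)
      forest (pvR forest bird) (pvL forest bird) 0
      ((pvR forest bird).length + (pvL forest bird).length + 1) le_rfl (by omega)
    simp only [zero_add] at hchar
    suffices hs : pvTail 1 (pvStopF forest (pvR forest bird) (pvL forest bird) 0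
        ((pvR forest bird).length + (pvL forest bird).length + 1)) = [] by
      rw [hs]; simp
    cases hstop : pvStopF forest (pvR forest bird) (pvL forest bird) 0
        ((pvR forest bird).length + (pvL forest bird).length + 1) with
    | none => simp [pvTail]
    | some b =>
      cases b with
      | true =>
        exact absurd ((pvPreArg_iff forest bird hrange.1 hrange.2).mpr (hchar.1.mp hstop))
          (hpre hrange)
      | false =>
        exact absurd ⟨hrange.1, hrange.2, (pvDArg_iff forest bird hrange.1 hrange.2).mpr (hchar.2.mp hstop)⟩ hnd
  · simp only [collect_sticks, pvALoop]
    rw [if_pos (by norm_num : (0:Int) < 100), if_neg hrange]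
    simp only [collect_sticks_alt]
    rw [if_neg hrange]

theorem collect_sticks_changed : Claim_changed_collect_sticks := by
  unfold Claim_changed_collect_sticks; decide

theorem collect_sticks_tight : Claim_exact_collect_sticks := by
  intro forest bird hdom hpre hd
  rcases hd with ⟨hb0, hb1, hrest⟩
  obtain ⟨hlen, hsum⟩ := (pvDArg_iff forest bird hb0 hb1).mp hrest
  rw [collect_sticks_eq forest bird hb0 hb1]
  have hchar := pvStopF_char ((pvR forest bird).length + (pvL forest bird).length)
    forest (pvR forest bird) (pvL forest bird) 0
    ((pvR forest bird).length + (pvL forest bird).length + 1) le_rfl (by omega)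
  simp only [zero_add] at hchar
  rw [hchar.2.mpr ⟨hlen, hsum⟩]
  intro hc
  have := congrArg List.length hc
  simp [pvTail] at this
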